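-- pv_equiv track=rewrite | github.com/cauldronpumpkin/karkhana | backend/app/services/policy_engine.py | _uses_high_risk_action
-- ===== SOURCE A (Python) =====
-- def _uses_high_risk_action(build_steps: list[str], verification_commands: list[str]) -> bool:
--     risky_patterns = (
--         "deploy production",
--         "production deploy",
--         "deploy to production",
--         "secret",
--         "api key",
--         "credential",
--         "drop table",
--         "delete from",
--         "truncate",
--         "rm -rf",
--         "kubectl delete",
--         "aws s3 rm",
--         "git push --force",
--         "force push",
--         "broad shell",
--         "unrestricted shell",
--     )
--     for command in [*build_steps, *verification_commands]:
--         lowered = command.lower()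
--         if any(pattern in lowered for pattern in risky_patterns):
--             return True
--     return False
-- ===== SOURCE B (Python) =====
-- # Patterns indexed by their first character: one left-to-right scan per command,
-- # testing only the patterns whose first letter matches the current position.
-- _RISKY_BY_FIRST = {
--     'a': ("api key", "aws s3 rm"),
--     'b': ("broad shell",),
--     'c': ("credential",),
--     'd': ("deploy production", "deploy to production", "drop table", "delete from"),
--     'f': ("force push",),
--     'g': ("git push --force",),
--     'k': ("kubectl delete",),
--     'p': ("production deploy",),
--     'r': ("rm -rf",),
--     's': ("secret",),
--     't': ("truncate",),
--     'u': ("unrestricted shell",),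
-- }
--
--
-- def _uses_high_risk_action(build_steps: list[str], verification_commands: list[str]) -> bool:
--     for command in build_steps + verification_commands:
--         s = command.lower()
--         for i in range(len(s)):
--             for p in _RISKY_BY_FIRST.get(s[i], ()):
--                 if s.startswith(p, i):
--                     return True
--     return False
-- ===== Notes on version B (the rewrite author's own statement) =====
-- stated objective: alternative
-- what changed: B replaces the per-command loop over all 16 patterns with repeated substring-containment tests by a first-character index built once: each lowered command is scanned position by position and only the patterns whose first letter matches the current character are prefix-tested there.
import Mathlib
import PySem

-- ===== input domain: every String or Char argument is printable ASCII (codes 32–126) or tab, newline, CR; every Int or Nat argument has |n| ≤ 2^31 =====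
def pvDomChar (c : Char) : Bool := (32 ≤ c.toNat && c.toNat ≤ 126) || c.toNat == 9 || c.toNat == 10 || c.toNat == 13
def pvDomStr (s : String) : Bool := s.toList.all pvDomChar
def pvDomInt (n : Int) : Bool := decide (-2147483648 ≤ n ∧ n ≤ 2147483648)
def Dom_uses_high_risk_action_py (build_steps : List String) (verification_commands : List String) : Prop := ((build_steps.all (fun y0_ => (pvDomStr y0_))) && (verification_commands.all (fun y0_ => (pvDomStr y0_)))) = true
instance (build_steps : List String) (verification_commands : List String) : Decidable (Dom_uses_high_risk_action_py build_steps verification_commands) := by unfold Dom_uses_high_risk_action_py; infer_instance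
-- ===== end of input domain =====

-- B indexes the patterns by first character and scans each command position by
-- position, prefix-testing only first-letter hits; an alternative search strategy
-- (no speed claim).

-- ===== PORT A =====
-- A: for each command (build steps then verification commands), lower it and
-- return True as soon as any of the 16 patterns is a substring of it; else False.
def pvRiskyPatterns : List String :=
  ["deploy production", "production deploy", "deploy to production", "secret",
   "api key", "credential", "drop table", "delete from", "truncate", "rm -rf",
   "kubectl delete", "aws s3 rm", "git push --force", "force push",
   "broad shell", "unrestricted shell"]

def uses_high_risk_action_py (build_steps : List String) (verification_commands : List String) : Bool :=
  (build_steps ++ verification_commands).any (fun command =>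
    let lowered := PySem.Str.lower command
    pvRiskyPatterns.any (fun pattern => PySem.Str.isIn pattern lowered))

-- ===== PORT B =====
-- B: the dict _RISKY_BY_FIRST, patterns keyed by their first character.
def pvRiskyByFirst : PySem.Dict Char (List String) :=
  PySem.Dict.ofList
  [('a', ["api key", "aws s3 rm"]),
   ('b', ["broad shell"]),
   ('c', ["credential"]),
   ('d', ["deploy production", "deploy to production", "drop table", "delete from"]),
   ('f', ["force push"]),
   ('g', ["git push --force"]),
   ('k', ["kubectl delete"]),
   ('p', ["production deploy"]),
   ('r', ["rm -rf"]),
   ('s', ["secret"]),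
   ('t', ["truncate"]),
   ('u', ["unrestricted shell"])]

-- B: lower the command, walk it position by position; at index i prefix-test
-- (s.startswith(p, i)) exactly the patterns whose first letter is s[i].
def uses_high_risk_action_py_alt (build_steps : List String) (verification_commands : List String) : Bool :=
  (build_steps ++ verification_commands).any (fun command =>
    let s := (PySem.Str.lower command).toList
    (List.range s.length).any (fun i =>
      (PySem.Dict.getD pvRiskyByFirst (s.getD i ' ') []).any (fun p =>
        PySem.Chars.startswith (s.drop i) p.toList)))

-- ===== PRECONDITION & SPEC =====
def Spec_uses_high_risk_action_py (build_steps : List String) (verification_commands : List String) (out : Bool) : Prop := out = uses_high_risk_action_py_alt build_steps verification_commands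
instance (build_steps : List String) (verification_commands : List String) (out : Bool) : Decidable (Spec_uses_high_risk_action_py build_steps verification_commands out) := by unfold Spec_uses_high_risk_action_py; infer_instance

-- ===== CLAIM (what is proved, stated in full; the proofs are below) =====
def Claim_equal_uses_high_risk_action_py : Prop := ∀ (build_steps : List String) (verification_commands : List String), Dom_uses_high_risk_action_py build_steps verification_commands → Spec_uses_high_risk_action_py build_steps verification_commands (uses_high_risk_action_py build_steps verification_commands)

-- ===== LEMMAS AND PROOFS =====

-- Every pattern is nonempty and listed in the index under its first character.
theorem pv_pattern_in_index :
    ∀ p ∈ pvRiskyPatterns, p.toList ≠ [] ∧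
      p ∈ PySem.Dict.getD pvRiskyByFirst (p.toList.headD ' ') [] := by decide

-- The index's item list, spelled out (its keys are distinct, so ofList appends).
theorem pv_items : pvRiskyByFirst.items =
  [('a', ["api key", "aws s3 rm"]),
   ('b', ["broad shell"]),
   ('c', ["credential"]),
   ('d', ["deploy production", "deploy to production", "drop table", "delete from"]),
   ('f', ["force push"]),
   ('g', ["git push --force"]),
   ('k', ["kubectl delete"]),
   ('p', ["production deploy"]),
   ('r', ["rm -rf"]),
   ('s', ["secret"]),
   ('t', ["truncate"]),
   ('u', ["unrestricted shell"])] := by decide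

-- Conversely, every pattern stored in the index is one of the 16 patterns.
theorem pv_index_in_patterns (c : Char) (p : String)
    (h : p ∈ PySem.Dict.getD pvRiskyByFirst c []) : p ∈ pvRiskyPatterns := by
  rcases hf : List.find? (fun q => q.1 == c) pvRiskyByFirst.items with _ | q
  · simp [PySem.Dict.getD, PySem.Dict.get?, hf] at h
  · have hq := List.mem_of_find?_eq_some hf
    simp only [PySem.Dict.getD, PySem.Dict.get?, hf, Option.map_some, Option.getD_some] at h
    rw [pv_items] at hq
    fin_cases hq <;> simp_all [pvRiskyPatterns] <;> tauto

-- Per command: A's pattern-containment test equals B's indexed positional scan.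
theorem pv_scan_eq (s : List Char) :
    pvRiskyPatterns.any (fun p => PySem.Chars.isIn p.toList s)
      = (List.range s.length).any (fun i =>
          (PySem.Dict.getD pvRiskyByFirst (s.getD i ' ') []).any (fun p =>
            PySem.Chars.startswith (s.drop i) p.toList)) := by
  rw [Bool.eq_iff_iff]
  simp only [List.any_eq_true, List.mem_range, PySem.Chars.isIn_iff_infix,
    PySem.Chars.startswith_iff]
  constructor
  · rintro ⟨p, hp, hinf⟩
    obtain ⟨hne, hidx⟩ := pv_pattern_in_index p hp
    obtain ⟨j, hpre⟩ := (PySem.Chars.exists_prefix_drop_iff_isIn p.toList s).mpr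
      ((PySem.Chars.isIn_iff_infix _ _).mpr hinf)
    rcases hcs : p.toList with _ | ⟨c0, t⟩
    · exact absurd hcs hne
    obtain ⟨r, hr⟩ := hpre
    rw [hcs] at hr
    have hj : j < s.length := by
      have := congrArg List.length hr
      simp [List.length_drop] at this
      omega
    have hget : s.getD j ' ' = c0 := by
      rw [List.getD_eq_getElem?_getD, ← List.head?_drop, ← hr]
      rfl
    refine ⟨j, hj, p, ?_, ?_⟩
    · rwa [hget, show c0 = p.toList.headD ' ' by rw [hcs]; rfl]
    · rw [hcs, ← hr]; exact ⟨r, rfl⟩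
  · rintro ⟨i, hi, p, hpmem, hpre⟩
    exact ⟨p, pv_index_in_patterns _ _ hpmem, hpre.isInfix.trans (List.drop_suffix i s).isInfix⟩

-- ===== VERDICT (by name: the statement is the Claim_ definition above) =====
theorem uses_high_risk_action_py_spec : Claim_equal_uses_high_risk_action_py := by
  intro build_steps verification_commands _
  unfold Spec_uses_high_risk_action_py uses_high_risk_action_py uses_high_risk_action_py_alt
  refine PySem.List.any_congr_mem ?_
  intro command _
  simpa using pv_scan_eq (PySem.Str.lower command).toList
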